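-- pv_equiv track=rewrite | github.com/pskh2004/Text-Compression-Algorithms | main.py | shannon_fano_encode
-- ===== SOURCE A (Python) =====
-- from collections import defaultdict, Counter
--
-- def shannon_fano_encode(s):
--     """Encode the input string using Shannon-Fano coding."""
--     if not s:
--         return "", {}
--
--     # Calculate character frequencies
--     freq_map = Counter(s)
--     sorted_chars = sorted(freq_map.keys(), key=lambda x: freq_map[x], reverse=True)
--
--     # Build Shannon-Fano codes
--     def build_shannon_fano_codes(characters, prefix=""):
--         if len(characters) == 1:
--             return {characters[0]: prefix}
--         mid = len(characters) // 2
--         left_codes = build_shannon_fano_codes(characters[:mid], prefix + "0")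
--         right_codes = build_shannon_fano_codes(characters[mid:], prefix + "1")
--         return {**left_codes, **right_codes}
--
--     shannon_fano_codes = build_shannon_fano_codes(sorted_chars)
--     encoded_output = ''.join([shannon_fano_codes[char] for char in s])
--     return encoded_output, shannon_fano_codes
-- ===== SOURCE B (Python) =====
-- from collections import defaultdict, Counter
--
-- def shannon_fano_encode(s):
--     """Encode the input string using Shannon-Fano coding.
--
--     Same frequency ordering as the original, but instead of recursively
--     splitting the list and merging dicts, each character's code is computed
--     independently by an iterative binary descent over its rank."""
--     if not s:
--         return "", {}
--
--     freq_map = Counter(s)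
--     sorted_chars = sorted(freq_map.keys(), key=lambda x: freq_map[x], reverse=True)
--     n = len(sorted_chars)
--
--     codes = {}
--     for i, c in enumerate(sorted_chars):
--         j, size, code = i, n, []
--         while size > 1:
--             half = size // 2
--             if j < half:
--                 code.append('0')
--                 size = half
--             else:
--                 code.append('1')
--                 j -= half
--                 size -= half
--         codes[c] = ''.join(code)
--
--     encoded = ''.join(codes[c] for c in s)
--     return encoded, codes
-- ===== Notes on version B (the rewrite author's own statement) =====
-- stated objective: alternative
-- what changed: The recursive midpoint-splitting build of the code dict (with {**left,**right} merges) is replaced by computing each character's code independently from its rank by an iterative binary descent over (index, segment-size).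
import Mathlib
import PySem

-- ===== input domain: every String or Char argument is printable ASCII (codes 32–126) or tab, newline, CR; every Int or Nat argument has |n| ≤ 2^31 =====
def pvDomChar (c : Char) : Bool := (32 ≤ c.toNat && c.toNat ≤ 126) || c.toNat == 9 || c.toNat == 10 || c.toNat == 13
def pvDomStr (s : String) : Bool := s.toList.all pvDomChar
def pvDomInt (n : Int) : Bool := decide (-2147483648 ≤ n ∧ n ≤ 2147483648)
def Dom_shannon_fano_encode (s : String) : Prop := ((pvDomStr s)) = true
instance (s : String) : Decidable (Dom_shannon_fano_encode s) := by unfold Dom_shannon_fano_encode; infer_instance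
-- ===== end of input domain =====

-- B replaces A's recursive split-and-merge code construction by an independent
-- per-character iterative binary descent over the character's rank; same results.

-- ===== PORT A =====
-- build_shannon_fano_codes: prefixes are carried as List Char, dict values as
-- List Char (String.mk applied at the end); '{**left, **right}' on the disjoint
-- key sets of the two halves is the append of the two association lists.
-- The '[] => []' branch is a totality guard only: Python recurses forever on [],
-- and the function is never called with an empty segment.
def buildSFA (chars : List Char) (pre : List Char) : List (Char × List Char) :=
  match chars with
  | [] => []
  | [c] => [(c, pre)]
  | c1 :: c2 :: rest =>
      let mid := (c1 :: c2 :: rest).length / 2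
      buildSFA ((c1 :: c2 :: rest).take mid) (pre ++ ['0']) ++
      buildSFA ((c1 :: c2 :: rest).drop mid) (pre ++ ['1'])
termination_by chars.length
decreasing_by
  · simp; omega
  · simp; omega

-- 'codes[char]' always hits an existing key (char ∈ s ⊆ keys), so getD's
-- default is never used.
def shannon_fano_encode (s : String) : String × (List (String × String)) :=
  if s.toList = [] then ("", [])
  else
    let xs := s.toList
    let freq := PySem.Dict.counter xs
    let sorted_chars := PySem.List.sorted freq.keys (fun c => freq.getD c 0) true
    let codes := buildSFA sorted_chars []
    let d := PySem.Dict.mk codes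
    (String.mk (PySem.Chars.join [] (xs.map (fun c => d.getD c []))),
     codes.map (fun p => (String.mk [p.1], String.mk p.2)))

-- ===== PORT B =====
-- the 'while size > 1' binary-descent loop of Source B
def sfCodeLoop (j size : Nat) (code : List Char) : List Char :=
  if size ≤ 1 then code
  else
    let half := size / 2
    if j < half then sfCodeLoop j half (code ++ ['0'])
    else sfCodeLoop (j - half) (size - half) (code ++ ['1'])
termination_by size
decreasing_by
  · omega
  · omega

-- the 'for i, c in enumerate(sorted_chars)' loop inserts a fresh key each time
-- (sorted_chars has no duplicates), so the dict it builds is this map.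
def shannon_fano_encode_alt (s : String) : String × (List (String × String)) :=
  if s.toList = [] then ("", [])
  else
    let xs := s.toList
    let freq := PySem.Dict.counter xs
    let sorted_chars := PySem.List.sorted freq.keys (fun c => freq.getD c 0) true
    let n := sorted_chars.length
    let codes := (PySem.List.enumerate sorted_chars).map
      (fun p => (p.2, sfCodeLoop p.1.toNat n []))
    let d := PySem.Dict.mk codes
    (String.mk (PySem.Chars.join [] (xs.map (fun c => d.getD c []))),
     codes.map (fun p => (String.mk [p.1], String.mk p.2)))

-- ===== PRECONDITION & SPEC =====
def Spec_shannon_fano_encode (s : String) (out : String × (List (String × String))) : Prop := out = shannon_fano_encode_alt s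
instance (s : String) (out : String × (List (String × String))) : Decidable (Spec_shannon_fano_encode s out) := by unfold Spec_shannon_fano_encode; infer_instance

-- ===== CLAIM (what is proved, stated in full; the proofs are below) =====
def Claim_equal_shannon_fano_encode : Prop := ∀ (s : String), Dom_shannon_fano_encode s → Spec_shannon_fano_encode s (shannon_fano_encode s)

-- ===== LEMMAS AND PROOFS =====

-- A's recursive split-and-merge build equals B's per-rank binary descent, for
-- any segment enumerated from any start index k and any prefix.
lemma buildSFA_eq (n : Nat) : ∀ (chars : List Char) (k : Nat) (pre : List Char),
    chars.length = n → chars ≠ [] →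
    buildSFA chars pre = (PySem.List.enumerate chars (k : Int)).map
      (fun p => (p.2, sfCodeLoop (p.1.toNat - k) chars.length pre)) := by
  induction n using Nat.strong_induction_on with
  | _ n ih =>
    intro chars k pre hlen hne
    match chars with
    | [] => exact absurd rfl hne
    | [c] =>
        simp [buildSFA, PySem.List.enumerate_cons, PySem.List.enumerate_nil, sfCodeLoop]
    | c1 :: c2 :: rest =>
        have hm : (c1 :: c2 :: rest).length = rest.length + 2 := by simp
        set L := c1 :: c2 :: rest with hL
        set m := L.length with hmdef
        have h2 : 2 ≤ m := by simp [hmdef, hL]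
        have hmid1 : 1 ≤ m / 2 := by omega
        have hmidlt : m / 2 < m := by omega
        have hTlen : (L.take (m / 2)).length = m / 2 := by
          simp [hmdef]; omega
        have hDlen : (L.drop (m / 2)).length = m - m / 2 := by simp [hmdef]
        have hTne : L.take (m / 2) ≠ [] := by
          intro h; have := congrArg List.length h; simp [hTlen] at this; omega
        have hDne : L.drop (m / 2) ≠ [] := by
          intro h; have := congrArg List.length h; simp [hDlen] at this; omega
        have hstep : buildSFA L pre =
            buildSFA (L.take (m / 2)) (pre ++ ['0']) ++
            buildSFA (L.drop (m / 2)) (pre ++ ['1']) := by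
          conv_lhs => rw [hL, buildSFA]
        rw [hstep]
        rw [ih (m / 2) (by omega) _ k (pre ++ ['0']) hTlen hTne]
        rw [ih (m - m / 2) (by omega) _ (k + m / 2) (pre ++ ['1']) hDlen hDne]
        have hsplit : PySem.List.enumerate L (k : Int) =
            PySem.List.enumerate (L.take (m / 2)) (k : Int) ++
            PySem.List.enumerate (L.drop (m / 2)) ((k : Int) + (L.take (m / 2)).length) := by
          conv_lhs => rw [← List.take_append_drop (m / 2) L]
          rw [PySem.List.enumerate_append]
        rw [hsplit, List.map_append, hTlen]
        have hcast : (k : Int) + ((m / 2 : Nat) : Int) = ((k + m / 2 : Nat) : Int) := by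
          push_cast; ring
        rw [hcast]
        congr 1
        · apply List.map_congr_left
          intro p hp
          rw [PySem.List.mem_enumerate_iff] at hp
          obtain ⟨j, hj, rfl⟩ := hp
          rw [hTlen] at hj
          have ht : ((k : Int) + (j : Int)).toNat - k = j := by omega
          rw [ht]
          have : sfCodeLoop j L.length pre = sfCodeLoop j (m / 2) (pre ++ ['0']) := by
            rw [sfCodeLoop]
            simp only [← hmdef]
            rw [if_neg (by omega)]
            rw [if_pos hj]
          rw [this]
        · apply List.map_congr_left
          intro p hp
          rw [PySem.List.mem_enumerate_iff] at hp
          obtain ⟨j, hj, rfl⟩ := hp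
          rw [hDlen] at hj
          have ht1 : ((((k + m / 2 : Nat) : Int)) + (j : Int)).toNat - k = m / 2 + j := by
            push_cast; omega
          have ht2 : ((((k + m / 2 : Nat) : Int)) + (j : Int)).toNat - (k + m / 2) = j := by
            push_cast; omega
          rw [ht1, ht2]
          have : sfCodeLoop (m / 2 + j) L.length pre = sfCodeLoop j (m - m / 2) (pre ++ ['1']) := by
            rw [sfCodeLoop]
            simp only [← hmdef]
            rw [if_neg (by omega)]
            rw [if_neg (by omega)]
            congr 1
            omega
          rw [hDlen, this]

-- ===== VERDICT (by name: the statement is the Claim_ definition above) =====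
theorem shannon_fano_encode_spec : Claim_equal_shannon_fano_encode := by
  intro s _
  unfold Spec_shannon_fano_encode shannon_fano_encode shannon_fano_encode_alt
  by_cases h : s.toList = []
  · simp [h]
  · rw [if_neg h, if_neg h]
    have hscne : PySem.List.sorted (PySem.Dict.counter s.toList).keys
        (fun c => (PySem.Dict.counter s.toList).getD c 0) true ≠ [] := by
      rw [Ne, PySem.List.sorted_eq_nil_iff, PySem.Dict.keys_counter]
      match s.toList, h with
      | c :: t, _ =>
        intro hemp
        have : c ∈ PySem.Set.ofList (c :: t) := by
          rw [PySem.Set.mem_ofList]; exact List.mem_cons_self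
        rw [hemp] at this
        exact (List.not_mem_nil) this
    simp only [buildSFA_eq _ _ 0 [] rfl hscne, Nat.sub_zero, Nat.cast_zero]
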